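-- pv_equiv track=rewrite | github.com/NeuraXmy/mybot | src/plugins/statistics/sql.py | get_shortname
-- ===== SOURCE A (Python) =====
-- def get_shortname(name, limit):
--     l = 0
--     ret = ""
--     for c in name:
--         if l >= limit:
--             ret += "..."
--             break
--         l += 1 if ord(c) < 128 else 2
--         ret += c
--     return ret
-- ===== SOURCE B (Python) =====
-- def _bisect_left(a, x):
--     lo, hi = 0, len(a)
--     while lo < hi:
--         mid = (lo + hi) // 2
--         if a[mid] < x:
--             lo = mid + 1
--         else:
--             hi = mid
--     return lo
--
-- def get_shortname(name, limit):
--     # cum[i] = total display width of name[:i]; strictly increasing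
--     cum = [0]
--     last = 0
--     for c in name:
--         last += 1 if ord(c) < 128 else 2
--         cum.append(last)
--     i = _bisect_left(cum, limit)
--     if i < len(name):
--         return name[:i] + "..."
--     return name
-- ===== Notes on version B (the rewrite author's own statement) =====
-- stated objective: alternative
-- what changed: B builds the strictly-increasing prefix-weight table once and binary-searches (bisect_left) for the cutoff index, then slices, instead of A's sequential accumulate-and-append scan with an in-loop break.
import Mathlib
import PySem

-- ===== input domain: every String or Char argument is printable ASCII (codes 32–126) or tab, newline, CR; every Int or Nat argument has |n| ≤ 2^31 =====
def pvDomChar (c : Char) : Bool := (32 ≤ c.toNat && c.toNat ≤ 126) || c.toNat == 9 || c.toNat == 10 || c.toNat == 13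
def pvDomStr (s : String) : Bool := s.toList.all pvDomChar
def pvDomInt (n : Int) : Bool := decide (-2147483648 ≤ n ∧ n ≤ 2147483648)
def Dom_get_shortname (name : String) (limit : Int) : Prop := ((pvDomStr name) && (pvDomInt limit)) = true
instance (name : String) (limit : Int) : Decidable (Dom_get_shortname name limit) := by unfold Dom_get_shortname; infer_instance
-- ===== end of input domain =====

-- B replaces A's sequential accumulate-and-break scan by a prefix-weight table plus
-- binary search (bisect_left) for the cutoff index, then a slice (objective: alternative).

-- ===== PORT A =====
-- A's loop: running weight l, accumulated ret, break (append "...") once l ≥ limit.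
def pvGoA : List Char → Int → Int → List Char → List Char
  | [], _, _, ret => ret
  | c :: cs, limit, l, ret =>
    if l ≥ limit then ret ++ "...".toList
    else pvGoA cs limit (l + (if c.toNat < 128 then 1 else 2)) (ret ++ [c])

def get_shortname (name : String) (limit : Int) : String :=
  String.ofList (pvGoA name.toList limit 0 [])

-- ===== PORT B =====
def pvWeight (c : Char) : Int := if c.toNat < 128 then 1 else 2

-- Source B's table-building loop: cum starts [0], last starts 0, append last+weight each char.
def pvCumAux : List Char → List Int → Int → List Int
  | [], cum, _ => cum
  | c :: cs, cum, last => pvCumAux cs (cum ++ [last + pvWeight c]) (last + pvWeight c)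

-- Source B's hand-written _bisect_left (while lo < hi: mid=(lo+hi)//2; …).
def pvBisectLeft (a : List Int) (x : Int) (lo hi : Nat) : Nat :=
  if h : lo < hi then
    if a.getD ((lo + hi) / 2) 0 < x then pvBisectLeft a x ((lo + hi) / 2 + 1) hi
    else pvBisectLeft a x lo ((lo + hi) / 2)
  else lo
termination_by hi - lo
decreasing_by all_goals omega

def get_shortname_alt (name : String) (limit : Int) : String :=
  let cum := pvCumAux name.toList [0] 0
  let i := pvBisectLeft cum limit 0 cum.length
  if i < name.toList.length then String.ofList (name.toList.take i ++ "...".toList)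
  else name

-- ===== PRECONDITION & SPEC =====
def Spec_get_shortname (name : String) (limit : Int) (out : String) : Prop := out = get_shortname_alt name limit
instance (name : String) (limit : Int) (out : String) : Decidable (Spec_get_shortname name limit out) := by unfold Spec_get_shortname; infer_instance

-- ===== CLAIM (what is proved, stated in full; the proofs are below) =====
def Claim_equal_get_shortname : Prop := ∀ (name : String) (limit : Int), Dom_get_shortname name limit → Spec_get_shortname name limit (get_shortname name limit)

-- ===== LEMMAS AND PROOFS =====

/-- Weight of a prefix of length `m`. -/
def pvW (cs : List Char) (m : Nat) : Int := ((cs.take m).map pvWeight).sum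

/-- The ideal cumulative-weight table. -/
def pvCumS : Int → List Char → List Int
  | s, [] => [s]
  | s, c :: cs => s :: pvCumS (s + pvWeight c) cs

/-- Number of characters A keeps, as a function of the remaining budget. -/
def pvKcut : List Char → Int → Nat
  | [], _ => 0
  | c :: cs, r => if r ≤ 0 then 0 else 1 + pvKcut cs (r - pvWeight c)

theorem pvCumAux_eq (cs : List Char) : ∀ (cum : List Int) (last : Int),
    pvCumAux cs cum last = cum ++ (pvCumS last cs).tail := by
  induction cs with
  | nil => intro cum last; simp [pvCumAux, pvCumS]
  | cons c cs ih =>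
    intro cum last
    have hhead : pvCumS (last + pvWeight c) cs
        = (last + pvWeight c) :: (pvCumS (last + pvWeight c) cs).tail := by
      cases cs <;> simp [pvCumS]
    simp only [pvCumAux, pvCumS, ih, List.tail_cons]
    rw [List.append_assoc]
    congr 1
    exact (List.singleton_append ▸ hhead.symm)

theorem pvCumS_length (cs : List Char) : ∀ s, (pvCumS s cs).length = cs.length + 1 := by
  induction cs with
  | nil => intro s; simp [pvCumS]
  | cons c cs ih => intro s; simp [pvCumS, ih]

theorem pvCumS_getD (cs : List Char) : ∀ (s : Int) (m : Nat), m ≤ cs.length →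
    (pvCumS s cs).getD m 0 = s + pvW cs m := by
  induction cs with
  | nil =>
    intro s m hm
    simp only [List.length_nil, Nat.le_zero] at hm
    subst hm; simp [pvCumS, pvW]
  | cons c cs ih =>
    intro s m hm
    cases m with
    | zero => simp [pvCumS, pvW]
    | succ m =>
      simp only [pvCumS, List.getD_cons_succ]
      rw [ih (s + pvWeight c) m (by simpa using hm)]
      simp [pvW, List.take_succ_cons]
      ring

theorem pvWeight_pos (c : Char) : 1 ≤ pvWeight c := by
  unfold pvWeight; split <;> omega

theorem pvWsum_nonneg (l : List Char) : 0 ≤ (l.map pvWeight).sum := by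
  apply List.sum_nonneg
  intro x hx
  obtain ⟨c, _, rfl⟩ := List.mem_map.mp hx
  have := pvWeight_pos c; omega

theorem pvW_mono (cs : List Char) {j m : Nat} (h : j ≤ m) : pvW cs j ≤ pvW cs m := by
  unfold pvW
  have hsplit : cs.take m = cs.take j ++ (cs.take m).drop j := by
    conv_lhs => rw [← List.take_append_drop j (cs.take m)]
    rw [List.take_take, Nat.min_eq_left h]
  rw [hsplit]
  simp only [List.map_append, List.sum_append]
  have := pvWsum_nonneg ((cs.take m).drop j)
  omega

theorem pvKcut_le (cs : List Char) : ∀ r, pvKcut cs r ≤ cs.length := by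
  induction cs with
  | nil => intro r; simp [pvKcut]
  | cons c cs ih =>
    intro r; unfold pvKcut; split
    · omega
    · have := ih (r - pvWeight c); simp only [List.length_cons]; omega

theorem pvKcut_lt (cs : List Char) : ∀ r j, j < pvKcut cs r → pvW cs j < r := by
  induction cs with
  | nil => intro r j h; simp [pvKcut] at h
  | cons c cs ih =>
    intro r j h
    unfold pvKcut at h
    split at h
    · omega
    · rename_i hr
      cases j with
      | zero => simp [pvW]; omega
      | succ j =>
        have := ih (r - pvWeight c) j (by omega)
        simp only [pvW, List.take_succ_cons, List.map_cons, List.sum_cons]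
        simp only [pvW] at this
        omega

theorem pvKcut_ge (cs : List Char) : ∀ r, pvKcut cs r < cs.length → r ≤ pvW cs (pvKcut cs r) := by
  induction cs with
  | nil => intro r h; simp at h
  | cons c cs ih =>
    intro r h
    by_cases hr : r ≤ 0
    · simp [pvKcut, hr, pvW]
    · have hlt : pvKcut cs (r - pvWeight c) < cs.length := by
        simp only [pvKcut, hr, if_false, List.length_cons] at h; omega
      have hih := ih (r - pvWeight c) hlt
      have hW : pvW (c :: cs) (1 + pvKcut cs (r - pvWeight c))
          = pvWeight c + pvW cs (pvKcut cs (r - pvWeight c)) := by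
        simp [pvW, Nat.add_comm 1, List.take_succ_cons]
      simp only [pvKcut, hr, if_false]
      rw [hW]; omega

/-- Binary-search correctness on the half-open range, given the cut point `k`. -/
theorem pvBisect_eq (a : List Int) (x : Int) (k : Nat)
    (hk1 : ∀ j, j < k → a.getD j 0 < x)
    (hk2 : ∀ j, k ≤ j → j < a.length → ¬ a.getD j 0 < x) :
    ∀ n lo hi, hi - lo ≤ n → lo ≤ k → k ≤ hi → hi ≤ a.length →
      pvBisectLeft a x lo hi = k := by
  intro n
  induction n with
  | zero =>
    intro lo hi h1 h2 h3 h4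
    rw [pvBisectLeft]
    have : ¬ lo < hi := by omega
    simp only [this, dite_false]
    omega
  | succ n ih =>
    intro lo hi h1 h2 h3 h4
    rw [pvBisectLeft]
    by_cases hlh : lo < hi
    · simp only [hlh, dite_true]
      have hmid1 : lo ≤ (lo + hi) / 2 := by omega
      have hmid2 : (lo + hi) / 2 < hi := by omega
      by_cases hm : a.getD ((lo + hi) / 2) 0 < x
      · simp only [hm, if_true]
        have hmk : (lo + hi) / 2 < k := by
          by_contra hc
          exact hk2 _ (by omega) (by omega) hm
        exact ih ((lo + hi) / 2 + 1) hi (by omega) (by omega) h3 h4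
      · simp only [hm, if_false]
        have hkm : k ≤ (lo + hi) / 2 := by
          by_contra hc
          exact hm (hk1 _ (by omega))
        exact ih lo ((lo + hi) / 2) (by omega) h2 hkm (by omega)
    · simp only [hlh, dite_false]; omega

/-- Characterisation of A's loop. -/
theorem pvGoA_char (cs : List Char) : ∀ (limit l : Int) (ret : List Char),
    pvGoA cs limit l ret =
      if pvKcut cs (limit - l) < cs.length then
        ret ++ cs.take (pvKcut cs (limit - l)) ++ "...".toList
      else ret ++ cs := by
  induction cs with
  | nil => intro limit l ret; simp [pvGoA, pvKcut]
  | cons c cs ih =>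
    intro limit l ret
    by_cases hb : l ≥ limit
    · have hr : limit - l ≤ 0 := by omega
      simp [pvGoA, hb, pvKcut, hr]
    · have hr : ¬ limit - l ≤ 0 := by omega
      have hw : limit - (l + (if c.toNat < 128 then 1 else 2)) = (limit - l) - pvWeight c := by
        unfold pvWeight; split <;> omega
      simp only [pvGoA, hb, if_false]
      rw [ih, hw]
      simp only [pvKcut, hr, if_false, List.length_cons]
      by_cases hlt : pvKcut cs (limit - l - pvWeight c) < cs.length
      · simp [hlt, List.take_succ_cons, Nat.add_comm 1]
      · simp [hlt, Nat.add_comm 1]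

theorem pvMain (name : String) (limit : Int) :
    get_shortname name limit = get_shortname_alt name limit := by
  unfold get_shortname get_shortname_alt
  dsimp only
  set cs := name.toList with hcs
  set n := cs.length with hn
  rw [pvGoA_char, pvCumAux_eq, sub_zero]
  have hcum : [(0 : Int)] ++ (pvCumS 0 cs).tail = pvCumS 0 cs := by
    cases cs <;> simp [pvCumS]
  rw [hcum]
  set k := pvKcut cs limit with hk
  have hkle : k ≤ n := pvKcut_le cs _
  have hlen : (pvCumS 0 cs).length = n + 1 := pvCumS_length cs 0
  have hget : ∀ m, m ≤ n → (pvCumS 0 cs).getD m 0 = pvW cs m := by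
    intro m hm; rw [pvCumS_getD cs 0 m hm]; ring
  by_cases hkn : k < n
  · -- cutoff strictly inside the string: both sides truncate at k and append "..."
    have hge : limit ≤ pvW cs k := by
      rw [hk]; exact pvKcut_ge cs limit (by omega)
    have hbl : pvBisectLeft (pvCumS 0 cs) limit 0 (pvCumS 0 cs).length = k := by
      apply pvBisect_eq _ _ k
      · intro j hj
        rw [hget j (by omega)]
        exact pvKcut_lt cs limit j (by omega)
      · intro j hj hjl
        rw [hlen] at hjl
        rw [hget j (by omega)]
        have := pvW_mono cs hj
        omega
      · exact Nat.le_refl _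
      · omega
      · omega
      · omega
    rw [hbl]
    have h1 : k < cs.length := by omega
    simp [hkn, h1]
  · -- the whole string fits: A returns all its chars, B returns name unchanged
    have hke : k = n := by omega
    have hbl : pvBisectLeft (pvCumS 0 cs) limit 0 (pvCumS 0 cs).length =
        if pvW cs n < limit then n + 1 else n := by
      apply pvBisect_eq _ _ _
      · intro j hj
        have hjn : j ≤ n := by split at hj <;> omega
        rw [hget j hjn]
        rcases Nat.lt_or_ge j n with hjl | hjg
        · exact pvKcut_lt cs limit j (by omega)
        · split at hj
          · have hje : j = n := by omega
            subst hje; assumption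
          · omega
      · intro j hj hjl
        rw [hlen] at hjl
        split at hj
        · omega
        · rename_i h
          have hje : j = n := by omega
          subst hje
          rw [hget n (by omega)]
          exact h
      · exact Nat.le_refl _
      · omega
      · rw [hlen]; split <;> omega
      · exact le_rfl
    rw [hbl]
    have hni : ¬ (if pvW cs n < limit then n + 1 else n) < n := by split <;> omega
    rw [if_neg hni, if_neg (show ¬ k < cs.length by omega), List.nil_append]
    exact String.ofList_toList

-- ===== VERDICT (by name: the statement is the Claim_ definition above) =====
theorem get_shortname_spec : Claim_equal_get_shortname := by
  intro name limit _
  unfold Spec_get_shortname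
  exact pvMain name limit
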